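-- pv_equiv track=rewrite | github.com/ydb-platform/ydb | contrib/python/toloka-kit/toloka/util/__init__.py | rename_dict_keys
-- ===== SOURCE A (Python) =====
-- from typing import Any, Callable, Dict, Iterator
--
-- def rename_dict_keys(data: dict, mapping: Dict[str, str]):
--     renamed_dict = {}
--     for key, value in data.items():
--         renamed_key = mapping.get(key, key)
--         if renamed_key in renamed_dict:
--             raise ValueError(f'Key {renamed_key} repeats')
--         renamed_dict[renamed_key] = value
--
--     return renamed_dict
-- ===== SOURCE B (Python) =====
-- def rename_dict_keys(data: dict, mapping):
--     renamed_dict = {mapping.get(key, key): value for key, value in data.items()}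
--     if len(renamed_dict) != len(data):
--         # a collision happened: locate the first repeated renamed key in order
--         seen = set()
--         for key in data:
--             renamed_key = mapping.get(key, key)
--             if renamed_key in seen:
--                 raise ValueError(f'Key {renamed_key} repeats')
--             seen.add(renamed_key)
--     return renamed_dict
-- ===== Notes on version B (the rewrite author's own statement) =====
-- stated objective: alternative
-- what changed: B replaces A's fused build-and-check loop with a one-shot dict comprehension plus a size comparison, running a separate locate pass with a seen-set only when a collision exists.
import Mathlib
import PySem

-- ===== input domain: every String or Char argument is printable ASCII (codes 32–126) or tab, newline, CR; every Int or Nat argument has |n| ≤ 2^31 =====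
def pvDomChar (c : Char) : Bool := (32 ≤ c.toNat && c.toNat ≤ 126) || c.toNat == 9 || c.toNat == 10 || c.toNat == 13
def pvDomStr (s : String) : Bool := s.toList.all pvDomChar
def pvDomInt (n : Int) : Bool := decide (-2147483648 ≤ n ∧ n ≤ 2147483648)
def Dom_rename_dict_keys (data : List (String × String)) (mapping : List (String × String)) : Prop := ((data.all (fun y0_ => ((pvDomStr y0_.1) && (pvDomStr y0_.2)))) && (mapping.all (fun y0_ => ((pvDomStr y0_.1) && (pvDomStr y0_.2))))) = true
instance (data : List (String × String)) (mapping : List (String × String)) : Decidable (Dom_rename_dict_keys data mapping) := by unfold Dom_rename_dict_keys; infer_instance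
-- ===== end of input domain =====

-- B changes the decomposition: one-shot build + size check + conditional locate pass, instead of A's fused build-and-check loop; same cost.

-- ===== PORT A =====
-- the loop 'for key, value in data.items(): …'; 'none' models the explicit 'raise ValueError' (excluded by Pre_)
def renameLoopA (m : PySem.Dict String String) :
    List (String × String) → PySem.Dict String String → Option (PySem.Dict String String)
  | [], acc => some acc
  | (key, value) :: rest, acc =>
      let rk := m.getD key key
      if acc.contains rk then none   -- 'raise ValueError(f'Key {renamed_key} repeats')'
      else renameLoopA m rest (acc.insert rk value)

def rename_dict_keys (data : List (String × String)) (mapping : List (String × String)) : List (String × String) :=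
  -- the raising path (none) returns []: those inputs are excluded by Pre_
  ((renameLoopA (PySem.Dict.ofList mapping) (PySem.Dict.ofList data).items PySem.Dict.empty).map PySem.Dict.items).getD []

-- ===== PORT B =====
-- B's conditional locate pass: 'for key in data: … raise ValueError …'; every exit of this pass raises in Python,
-- modelled as [] here (unreachable under Pre_)
def locateLoopB (m : PySem.Dict String String) :
    List (String × String) → PySem.Set String → List (String × String)
  | [], _ => []   -- loop falls through (cannot happen when sizes differ); Python then returns renamed_dict, but this branch is unreachable
  | (key, _) :: rest, seen =>
      let rk := m.getD key key
      if rk ∈ seen then []   -- 'raise ValueError' — excluded by Pre_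
      else locateLoopB m rest (seen.add rk)

def rename_dict_keys_alt (data : List (String × String)) (mapping : List (String × String)) : List (String × String) :=
  let d := PySem.Dict.ofList data
  let m := PySem.Dict.ofList mapping
  let renamed := d.items.foldl (fun acc p => acc.insert (m.getD p.1 p.1) p.2) PySem.Dict.empty
  if renamed.size ≠ d.size then locateLoopB m d.items (PySem.Set.ofList [])
  else renamed.items

-- ===== PRECONDITION & SPEC =====
-- Pre_ excludes exactly the inputs on which A raises ValueError: two keys of data renaming to the same key
def Pre_rename_dict_keys (data : List (String × String)) (mapping : List (String × String)) : Prop :=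
  ((PySem.Dict.ofList data).items.map
    (fun p => (PySem.Dict.ofList mapping).getD p.1 p.1)).Nodup

instance (data : List (String × String)) (mapping : List (String × String)) : Decidable (Pre_rename_dict_keys data mapping) := by unfold Pre_rename_dict_keys; infer_instance

def pvWitness_rename_dict_keys : (List (String × String)) × (List (String × String)) :=
  ([("a", "1"), ("b", "2")], [("a", "x")])

def Spec_rename_dict_keys (data : List (String × String)) (mapping : List (String × String)) (out : List (String × String)) : Prop := out = rename_dict_keys_alt data mapping
instance (data : List (String × String)) (mapping : List (String × String)) (out : List (String × String)) : Decidable (Spec_rename_dict_keys data mapping out) := by unfold Spec_rename_dict_keys; infer_instance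

-- ===== CLAIM (what is proved, stated in full; the proofs are below) =====
def Claim_equal_rename_dict_keys : Prop := ∀ (data : List (String × String)) (mapping : List (String × String)), Dom_rename_dict_keys data mapping → Pre_rename_dict_keys data mapping → Spec_rename_dict_keys data mapping (rename_dict_keys data mapping)

-- ===== LEMMAS AND PROOFS =====

-- A's loop on fresh, pairwise-distinct renamed keys never raises and equals the plain insert-fold
theorem renameLoopA_eq_foldl (m : PySem.Dict String String) :
    ∀ (l : List (String × String)) (acc : PySem.Dict String String),
    (∀ p ∈ l, acc.contains (m.getD p.1 p.1) = false) →
    (l.map (fun p => m.getD p.1 p.1)).Nodup →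
    renameLoopA m l acc = some (l.foldl (fun acc p => acc.insert (m.getD p.1 p.1) p.2) acc)
  | [], acc, _, _ => rfl
  | (key, value) :: rest, acc, hfresh, hnd => by
      have h0 : acc.contains (m.getD key key) = false := hfresh (key, value) (by simp)
      simp only [renameLoopA, h0, if_false, List.foldl_cons, Bool.false_eq_true]
      apply renameLoopA_eq_foldl
      · intro p hp
        rw [PySem.Dict.contains_insert]
        have hne : m.getD p.1 p.1 ≠ m.getD key key := by
          simp only [List.map_cons, List.nodup_cons] at hnd
          intro h
          exact hnd.1 (h ▸ List.mem_map_of_mem hp)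
        simp [hne, hfresh p (List.mem_cons_of_mem _ hp)]
      · simp only [List.map_cons, List.nodup_cons] at hnd
        exact hnd.2

theorem rename_dict_keys_spec : Claim_equal_rename_dict_keys := by
  intro data mapping _ hpre
  unfold Spec_rename_dict_keys rename_dict_keys rename_dict_keys_alt
  unfold Pre_rename_dict_keys at hpre
  set m := PySem.Dict.ofList mapping
  set l := (PySem.Dict.ofList data).items with hl
  have hfresh : ∀ p ∈ l, (PySem.Dict.empty : PySem.Dict String String).contains (m.getD p.1 p.1) = false := by
    intro p _; exact PySem.Dict.contains_empty _
  rw [renameLoopA_eq_foldl m l PySem.Dict.empty hfresh hpre]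
  have hitems := PySem.Dict.items_foldl_insert_fresh l
      (k := fun p => m.getD p.1 p.1) (v := fun p => p.2) (d := PySem.Dict.empty)
      hfresh hpre
  have hsize : (l.foldl (fun acc p => acc.insert (m.getD p.1 p.1) p.2) PySem.Dict.empty).size
      = (PySem.Dict.ofList data).size := by
    simp only [PySem.Dict.size]
    rw [← hl]
    rw [show (l.foldl (fun acc p => acc.insert (m.getD p.1 p.1) p.2) PySem.Dict.empty).items
        = PySem.Dict.empty.items ++ l.map (fun p => (m.getD p.1 p.1, p.2)) from hitems]
    simp [PySem.Dict.empty]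
  simp only [Option.map_some, Option.getD_some, ← hl, hsize, ite_not, if_pos]

-- ===== VERDICT (by name: the statement is the Claim_ definition above) =====
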